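-- pv_equiv track=rewrite | github.com/eocdb/ocdb-server | eocdb/ws/webservice.py | url_pattern
-- ===== SOURCE A (Python) =====
-- def url_pattern(pattern: str):
--     """
--     Convert a string *pattern* where any occurrences of ``{{NAME}}`` are replaced by an equivalent
--     regex expression which will assign matching character groups to NAME. Characters match until
--     one of the RFC 2396 reserved characters is found or the end of the *pattern* is reached.
--
--     The function can be used to map URLs patterns to request handlers as desired by the Tornado web server, see
--     http://www.tornadoweb.org/en/stable/web.html
--
--     RFC 2396 Uniform Resource Identifiers (URI): Generic Syntax lists
--     the following reserved characters::
--
--         reserved    = ";" | "/" | "?" | ":" | "@" | "&" | "=" | "+" | "$" | ","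
--
--     :param pattern: URL pattern
--     :return: equivalent regex pattern
--     :raise ValueError: if *pattern* is invalid
--     """
--     name_pattern = '(?P<%s>[^\;\/\?\:\@\&\=\+\$\,]+)'
--     reg_expr = ''
--     pos = 0
--     while True:
--         pos1 = pattern.find('{', pos)
--         if pos1 >= 0:
--             pos2 = pattern.find('}', pos1 + 1)
--             if pos2 > pos1:
--                 name = pattern[pos1 + 1:pos2]
--                 if not name.isidentifier():
--                     raise ValueError('name in {name} must be a valid identifier, but got "%s"' % name)
--                 reg_expr += pattern[pos:pos1] + (name_pattern % name)
--                 pos = pos2 + 1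
--             else:
--                 raise ValueError('no matching "}" after "{" in "%s"' % pattern)
--
--         else:
--             reg_expr += pattern[pos:]
--             break
--     return reg_expr
-- ===== SOURCE B (Python) =====
-- def url_pattern(pattern: str):
--     """Recursive re-implementation: peel off one {name} placeholder per call using str.partition."""
--     name_pattern = '(?P<%s>[^\;\/\?\:\@\&\=\+\$\,]+)'
--     before, brace, rest = pattern.partition('{')
--     if not brace:
--         return before
--     name, close, tail = rest.partition('}')
--     if not close:
--         raise ValueError('no matching "}" after "{" in "%s"' % pattern)
--     if not name.isidentifier():
--         raise ValueError('name in {name} must be a valid identifier, but got "%s"' % name)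
--     return before + (name_pattern % name) + url_pattern(tail)
-- ===== Notes on version B (the rewrite author's own statement) =====
-- stated objective: simpler
-- what changed: Replaced A's index-based while-loop with find()/slicing and a running cursor by a recursive decomposition that peels one {name} placeholder per call using str.partition.
import Mathlib
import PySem

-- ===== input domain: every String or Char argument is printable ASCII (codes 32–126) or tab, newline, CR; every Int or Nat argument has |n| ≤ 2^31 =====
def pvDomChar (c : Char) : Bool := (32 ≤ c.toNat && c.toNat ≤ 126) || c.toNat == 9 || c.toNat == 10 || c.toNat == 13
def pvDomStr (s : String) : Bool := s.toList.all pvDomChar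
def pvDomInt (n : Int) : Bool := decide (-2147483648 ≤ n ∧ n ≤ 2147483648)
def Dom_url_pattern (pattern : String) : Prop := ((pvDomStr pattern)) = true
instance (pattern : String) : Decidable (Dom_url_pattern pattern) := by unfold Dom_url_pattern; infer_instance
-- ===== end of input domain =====

-- B replaces A's index-based while/find/slice loop by a recursive peel-one-placeholder
-- decomposition via str.partition (objective: simpler). Return-value equivalence only;
-- both versions raise ValueError on exactly the same inputs, excluded by Pre_.

-- ===== PORT A =====
-- shared helper: port of str.isidentifier, exact on the printable-ASCII domain
def identOk : List Char → Bool
  | [] => false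
  | c :: r => (PySem.Chars.isalpha c || c == '_') && r.all (fun d => PySem.Chars.isalnum d || d == '_')

-- port of `name_pattern % name`
def namePat (name : List Char) : List Char :=
  "(?P<".toList ++ name ++ ">[^\\;\\/\\?\\:\\@\\&\\=\\+\\$\\,]+)".toList

-- A's `while True` loop over the cursor `pos`; fuel ≥ iteration count (pos grows ≥ 2 per step).
-- The two `raise ValueError` branches return the accumulator (those inputs are outside Pre_).
def urlLoop (pattern : List Char) (fuel : Nat) (pos : Int) (acc : List Char) : List Char :=
  match fuel with
  | 0 => acc
  | f + 1 =>
    let pos1 := PySem.Chars.findFrom pattern ['{'] pos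
    if 0 ≤ pos1 then
      let pos2 := PySem.Chars.findFrom pattern ['}'] (pos1 + 1)
      if pos1 < pos2 then
        let name := PySem.Chars.slice pattern (some (pos1 + 1)) (some pos2)
        if identOk name then
          urlLoop pattern f (pos2 + 1) (acc ++ PySem.Chars.slice pattern (some pos) (some pos1) ++ namePat name)
        else acc          -- raise ValueError (invalid identifier) — outside Pre_
      else acc            -- raise ValueError (no matching "}") — outside Pre_
    else acc ++ PySem.Chars.slice pattern (some pos) none

def url_pattern (pattern : String) : String :=
  String.ofList (urlLoop pattern.toList (pattern.toList.length + 1) 0 [])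

-- ===== PORT B =====
-- Source B: before, brace, rest = pattern.partition('{'); name, close, tail = rest.partition('}').
-- partition with a one-char separator is ported exactly as takeWhile/dropWhile on that char.
def altCore (cs : List Char) : List Char :=
  let before := cs.takeWhile (· ≠ '{')
  match h : cs.dropWhile (· ≠ '{') with
  | [] => before                                   -- no '{': return before
  | _ :: after =>
    let name := after.takeWhile (· ≠ '}')
    match h2 : after.dropWhile (· ≠ '}') with
    | [] => []                                     -- raise ValueError (no matching "}") — outside Pre_
    | _ :: tail =>
      if identOk name then before ++ namePat name ++ altCore tail
      else []                                      -- raise ValueError (invalid identifier) — outside Pre_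
termination_by cs.length
decreasing_by
  have h1 : (cs.dropWhile (· ≠ '{')).length ≤ cs.length := cs.length_dropWhile_le _
  have h2' : (after.dropWhile (· ≠ '}')).length ≤ after.length := after.length_dropWhile_le _
  rw [h] at h1; rw [h2] at h2'; simp at h1 h2'; omega

def url_pattern_alt (pattern : String) : String :=
  String.ofList (altCore pattern.toList)

-- ===== PRECONDITION & SPEC =====
-- Pre_ excludes exactly the inputs on which A raises ValueError (B raises there too):
-- after each '{' a '}' must follow before the next '{', and the enclosed name must be
-- a valid identifier.
def Pre_url_pattern (pattern : String) : Prop :=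
  ∀ part ∈ (pattern.toList.splitOn '{').tail,
    '}' ∈ part ∧ identOk (part.takeWhile (· ≠ '}')) = true
instance (pattern : String) : Decidable (Pre_url_pattern pattern) := by
  unfold Pre_url_pattern; infer_instance

def pvWitness_url_pattern : String := "/a/{name}/b"

def Spec_url_pattern (pattern : String) (out : String) : Prop := out = url_pattern_alt pattern
instance (pattern : String) (out : String) : Decidable (Spec_url_pattern pattern out) := by unfold Spec_url_pattern; infer_instance

-- ===== CLAIM (what is proved, stated in full; the proofs are below) =====
def Claim_equal_url_pattern : Prop := ∀ (pattern : String), Dom_url_pattern pattern → Pre_url_pattern pattern → Spec_url_pattern pattern (url_pattern pattern)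

-- ===== LEMMAS AND PROOFS =====

-- the Pre_ condition read on a character list
def PreC (cs : List Char) : Prop :=
  ∀ part ∈ (cs.splitOn '{').tail, '}' ∈ part ∧ identOk (part.takeWhile (· ≠ '}')) = true

theorem preC_of_pre (pattern : String) (h : Pre_url_pattern pattern) : PreC pattern.toList := h

theorem prefix_singleton (c : Char) (l : List Char) : [c] <+: l ↔ l[0]? = some c := by
  cases l with
  | nil => simp
  | cons x t =>
    constructor
    · rintro ⟨s, hs⟩
      injection hs with h1 _
      simp [h1]
    · intro h
      simp only [List.getElem?_cons_zero, Option.some.injEq] at h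
      exact ⟨t, by rw [h]; rfl⟩

theorem dropWhile_mem (c : Char) (l : List Char) (h : c ∈ l) :
    l.dropWhile (· ≠ c) = c :: (l.dropWhile (· ≠ c)).tail := by
  induction l with
  | nil => cases h
  | cons x t ih =>
    by_cases hx : x = c
    · subst hx; simp [List.dropWhile_cons]
    · have hc : c ∈ t := by cases h with
        | head => exact absurd rfl hx
        | tail _ h => exact h
      simp only [List.dropWhile_cons]
      simp only [ne_eq, hx, not_false_eq_true, decide_true, if_true]
      exact ih hc

theorem split_at_mem (c : Char) (l : List Char) (h : c ∈ l) :
    l = l.takeWhile (· ≠ c) ++ c :: (l.dropWhile (· ≠ c)).tail := by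
  conv_lhs => rw [← List.takeWhile_append_dropWhile (p := fun x => decide (x ≠ c)) (l := l)]
  exact congrArg (l.takeWhile (fun x => decide (x ≠ c)) ++ ·) (dropWhile_mem c l h)

theorem takeWhile_append_not (p : Char → Bool) (l1 l2 : List Char) (x : Char)
    (h1 : ∀ y ∈ l1, p y = true) (hx : p x = false) :
    (l1 ++ x :: l2).takeWhile p = l1 ∧ (l1 ++ x :: l2).dropWhile p = x :: l2 := by
  induction l1 with
  | nil => simp [List.takeWhile_cons, List.dropWhile_cons, hx]
  | cons y t ih =>
    have hy : p y = true := h1 y (List.mem_cons_self)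
    have := ih (fun z hz => h1 z (List.mem_cons_of_mem _ hz))
    simp [List.takeWhile_cons, List.dropWhile_cons, hy, this.1, this.2]

theorem takeWhile_all (p : Char → Bool) (l : List Char) (h : ∀ y ∈ l, p y = true) :
    l.takeWhile p = l ∧ l.dropWhile p = [] := by
  induction l with
  | nil => simp
  | cons y t ih =>
    have hy : p y = true := h y (List.mem_cons_self)
    have := ih (fun z hz => h z (List.mem_cons_of_mem _ hz))
    simp [List.takeWhile_cons, List.dropWhile_cons, hy, this.1, this.2]

theorem getElem?_append_self (A B : List Char) (c : Char) :
    (A ++ c :: B)[A.length]? = some c := by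
  induction A with
  | nil => simp
  | cons x t ih => simpa using ih

-- find of a single character points at the end of the takeWhile prefix
theorem find_singleton (l : List Char) (c : Char) (h : c ∈ l) :
    PySem.Chars.find l [c] = ((l.takeWhile (· ≠ c)).length : Int) := by
  obtain ⟨s, t, hst⟩ := List.append_of_mem h
  have hinf : [c] <:+: l := ⟨s, t, by rw [hst]; simp⟩
  have h0 : 0 ≤ PySem.Chars.find l [c] := (PySem.Chars.find_nonneg_iff _ _).mpr hinf
  obtain ⟨hpfx, hmin⟩ := PySem.Chars.find_spec h0
  have hradix : ∀ j : Nat, ([c] <+: l.drop j) ↔ l[j]? = some c := by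
    intro j
    rw [prefix_singleton, List.getElem?_drop]
    simp
  have hl := split_at_mem c l h
  have hgetA : l[(l.takeWhile (· ≠ c)).length]? = some c := by
    have := getElem?_append_self (l.takeWhile (· ≠ c)) ((l.dropWhile (· ≠ c)).tail) c
    rwa [← hl] at this
  have hlt : ∀ i, i < (l.takeWhile (· ≠ c)).length → l[i]? ≠ some c := by
    intro i hi heq
    have hmemA : l[i]? = (l.takeWhile (· ≠ c))[i]? := by
      conv_lhs => rw [hl]
      rw [List.getElem?_append_left hi]
    rw [hmemA, List.getElem?_eq_getElem hi] at heq
    have hmem : (l.takeWhile (· ≠ c))[i] ∈ l.takeWhile (· ≠ c) := List.getElem_mem hi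
    have := List.mem_takeWhile_imp hmem
    simp only [Option.some.injEq] at heq
    rw [heq] at this
    simp at this
  have hfeq : (PySem.Chars.find l [c]).toNat = (l.takeWhile (· ≠ c)).length := by
    rcases lt_trichotomy (PySem.Chars.find l [c]).toNat (l.takeWhile (· ≠ c)).length with h'|h'|h'
    · exact absurd ((hradix _).mp hpfx) (hlt _ h')
    · exact h'
    · exact absurd ((hradix _).mpr hgetA) (hmin _ h')
  rw [← Int.toNat_of_nonneg h0, hfeq]

-- nested takeWhile: the first c already lies inside `l.takeWhile q`
theorem takeWhile_nested (c : Char) (q : Char → Bool) (l : List Char)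
    (h : c ∈ l.takeWhile q) :
    l.takeWhile (· ≠ c) = (l.takeWhile q).takeWhile (· ≠ c) := by
  induction l with
  | nil => simp at h
  | cons x t ih =>
    by_cases hq : q x
    · simp only [List.takeWhile_cons, hq, if_true] at h ⊢
      by_cases hx : x = c
      · subst hx; simp [List.takeWhile_cons]
      · have hc : c ∈ t.takeWhile q := by
          cases h with
          | head => exact absurd rfl hx
          | tail _ h => exact h
        have hxc : (decide (x ≠ c)) = true := by simp [hx]
        rw [if_pos hxc, if_pos hxc]
        exact congrArg (x :: ·) (ih hc)
    · exfalso
      have ht : List.takeWhile q (x :: t) = [] := by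
        rw [List.takeWhile_cons, if_neg hq]
      rw [ht] at h
      cases h

theorem identOk_no_brace (l : List Char) (h : identOk l = true) : '{' ∉ l := by
  intro hm
  cases l with
  | nil => cases hm
  | cons x t =>
    simp only [identOk, Bool.and_eq_true] at h
    cases hm with
    | head => exact absurd h.1 (by decide)
    | tail _ hm => exact absurd ((List.all_eq_true.mp h.2) _ hm) (by decide)

theorem splitOnP_append_not (q : Char → Bool) (x l : List Char) (h : ∀ y ∈ x, q y = false) :
    (x ++ l).splitOnP q = (l.splitOnP q).modifyHead (x ++ ·) := by
  induction x with
  | nil => cases hl : l.splitOnP q with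
    | nil => exact absurd hl (List.splitOnP_ne_nil _ _)
    | cons a t => simp [hl]
  | cons y t ih =>
    have hy : q y = false := h y (List.mem_cons_self)
    have := ih (fun z hz => h z (List.mem_cons_of_mem _ hz))
    simp only [List.cons_append, List.splitOnP_cons, hy, Bool.false_eq_true, if_false, this,
      List.modifyHead_modifyHead]
    rfl

theorem splitOn_decomp (a rest : List Char) (h : '{' ∉ a) :
    (a ++ '{' :: rest).splitOn '{' = a :: rest.splitOn '{' := by
  simp only [List.splitOn]
  exact List.splitOnP_first _ a
    (fun y hy => by simp only [beq_iff_eq]; intro he; exact h (he ▸ hy)) '{' (by simp) rest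

theorem takeWhile_mem_head_splitOn (l : List Char) :
    l.takeWhile (· ≠ '{') ∈ l.splitOn '{' := by
  by_cases hm : '{' ∈ l
  · have h2 : l.splitOn '{' = l.takeWhile (· ≠ '{') :: ((l.dropWhile (· ≠ '{')).tail).splitOn '{' := by
      conv_lhs => rw [split_at_mem '{' l hm]
      exact splitOn_decomp _ _ (fun hy => by have := List.mem_takeWhile_imp hy; simp at this)
    rw [h2]
    exact List.mem_cons_self
  · have ht := takeWhile_all (fun y => decide (y ≠ '{')) l
      (fun y hy => by simp only [decide_eq_true_eq]; intro he; exact hm (he ▸ hy))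
    have hsingle : l.splitOn '{' = [l] := by
      simp only [List.splitOn]
      exact List.splitOnP_eq_single _ _
        (fun y hy => by simp only [beq_iff_eq]; intro he; exact hm (he ▸ hy))
    rw [hsingle]
    simp only [List.mem_singleton]
    exact ht.1

theorem altCore_no_brace (cs : List Char) (h : '{' ∉ cs) : altCore cs = cs := by
  have := takeWhile_all (fun y => decide (y ≠ '{')) cs
    (fun y hy => by simp only [decide_eq_true_eq]; intro he; exact h (he ▸ hy))
  rw [altCore]
  split
  · exact this.1
  · rename_i heq
    rw [this.2] at heq
    cases heq

theorem altCore_step (before name tail : List Char)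
    (h1 : '{' ∉ before) (h2 : '}' ∉ name) (hid : identOk name = true) :
    altCore (before ++ '{' :: (name ++ '}' :: tail)) = before ++ namePat name ++ altCore tail := by
  have hb := takeWhile_append_not (fun y => decide (y ≠ '{')) before (name ++ '}' :: tail) '{'
    (fun y hy => by simp only [decide_eq_true_eq]; intro he; exact h1 (he ▸ hy)) (by simp)
  have hn := takeWhile_append_not (fun y => decide (y ≠ '}')) name tail '}'
    (fun y hy => by simp only [decide_eq_true_eq]; intro he; exact h2 (he ▸ hy)) (by simp)
  rw [altCore]
  split
  · rename_i heq
    rw [hb.2] at heq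
    cases heq
  · rename_i head after heq
    rw [hb.2] at heq
    injection heq with he1 he2
    subst he2
    rw [hb.1]
    split
    · rename_i heq2
      rw [hn.2] at heq2
      cases heq2
    · rename_i h2h t2 heq2
      rw [hn.2] at heq2
      injection heq2 with hf1 hf2
      subst hf2
      show (if identOk (List.takeWhile (fun x => decide (x ≠ '}')) (name ++ '}' :: tail)) = true
          then before ++ namePat (List.takeWhile (fun x => decide (x ≠ '}')) (name ++ '}' :: tail))
               ++ altCore tail
          else []) = before ++ namePat name ++ altCore tail
      rw [hn.1, if_pos hid]

theorem loop_nobrace (cs pre acc : List Char) (f : Nat) (hm : '{' ∉ cs) :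
    urlLoop (pre ++ cs) (f + 1) (pre.length : Int) acc = acc ++ cs := by
  have hk1 : pre.length ≤ (pre ++ cs).length := by simp
  have hfind : PySem.Chars.find cs ['{'] = -1 :=
    (PySem.Chars.find_eq_neg_one_iff _ _).mpr
      (fun hinf => hm (hinf.sublist.subset (by simp)))
  simp only [urlLoop]
  rw [PySem.Chars.findFrom_natCast _ _ _ hk1, List.drop_left, hfind]
  simp [PySem.Chars.slice_eq_listSlice, PySem.List.slice_from_natCast, List.drop_left]

theorem main_loop : ∀ (n : Nat) (cs pre acc : List Char) (fuel : Nat),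
    cs.length ≤ n → PreC cs → cs.length < fuel →
    urlLoop (pre ++ cs) fuel (pre.length : Int) acc = acc ++ altCore cs := by
  intro n
  induction n with
  | zero =>
    intro cs pre acc fuel hn hpre hfuel
    have hcs : cs = [] := List.eq_nil_of_length_eq_zero (by omega)
    subst hcs
    cases fuel with
    | zero => omega
    | succ f =>
      rw [loop_nobrace _ _ _ _ (by simp), altCore_no_brace [] (by simp)]
  | succ n ih =>
    intro cs pre acc fuel hn hpre hfuel
    cases fuel with
    | zero => omega
    | succ f =>
    by_cases hm : '{' ∈ cs
    swap
    · rw [loop_nobrace _ _ _ _ hm, altCore_no_brace cs hm]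
    · have hcs : cs = cs.takeWhile (· ≠ '{') ++ '{' :: (cs.dropWhile (· ≠ '{')).tail :=
        split_at_mem '{' cs hm
      set a := cs.takeWhile (· ≠ '{') with ha
      set rest := (cs.dropWhile (· ≠ '{')).tail with hrestdef
      have hna : '{' ∉ a := fun hy => by have := List.mem_takeWhile_imp hy; simp at this
      have hsplit : cs.splitOn '{' = a :: rest.splitOn '{' := by
        conv_lhs => rw [hcs]
        exact splitOn_decomp a rest hna
      have hp := hpre (rest.takeWhile (· ≠ '{'))
        (by rw [hsplit]; simp only [List.tail_cons]; exact takeWhile_mem_head_splitOn rest)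
      obtain ⟨hclose, hid0⟩ := hp
      have hcloserest : '}' ∈ rest := (List.takeWhile_sublist _).subset hclose
      set name := rest.takeWhile (· ≠ '}') with hnamedef
      have hnameeq : name = (rest.takeWhile (· ≠ '{')).takeWhile (· ≠ '}') :=
        takeWhile_nested '}' _ rest hclose
      have hid : identOk name = true := by rw [hnameeq]; exact hid0
      have hnb : '}' ∉ name := fun hy => by have := List.mem_takeWhile_imp hy; simp at this
      have hnbrace : '{' ∉ name := identOk_no_brace name hid
      set tail := (rest.dropWhile (· ≠ '}')).tail with htaildef
      have hrest : rest = name ++ '}' :: tail := split_at_mem '}' rest hcloserest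
      have hlen : cs.length = a.length + 1 + (name.length + 1 + tail.length) := by
        conv_lhs => rw [hcs, hrest]
        simp [List.length_append]
        omega
      have hfind1 : PySem.Chars.find cs ['{'] = (a.length : Int) := find_singleton cs '{' hm
      have hfind2 : PySem.Chars.find rest ['}'] = (name.length : Int) :=
        find_singleton rest '}' hcloserest
      have hk1 : pre.length ≤ (pre ++ cs).length := by simp
      have hdrop2 : (pre ++ cs).drop (pre.length + a.length + 1) = rest := by
        conv_lhs => rw [hcs]
        rw [show pre ++ (a ++ '{' :: rest) = (pre ++ a ++ ['{']) ++ rest by simp]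
        rw [show pre.length + a.length + 1 = (pre ++ a ++ ['{']).length by simp; omega]
        exact List.drop_left
      simp only [urlLoop]
      have hpos1 : PySem.Chars.findFrom (pre ++ cs) ['{'] (pre.length : Int)
          = ((pre.length + a.length : Nat) : Int) := by
        rw [PySem.Chars.findFrom_natCast _ _ _ hk1, List.drop_left, hfind1]
        rw [if_neg (by omega)]
        push_cast; ring
      rw [hpos1]
      rw [if_pos (by positivity)]
      have hcast1 : (((pre.length + a.length : Nat) : Int) + 1)
          = ((pre.length + a.length + 1 : Nat) : Int) := by push_cast; ring
      rw [hcast1]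
      have hk2 : pre.length + a.length + 1 ≤ (pre ++ cs).length := by
        simp [List.length_append]; omega
      have hpos2 : PySem.Chars.findFrom (pre ++ cs) ['}'] ((pre.length + a.length + 1 : Nat) : Int)
          = ((pre.length + a.length + 1 + name.length : Nat) : Int) := by
        rw [PySem.Chars.findFrom_natCast _ _ _ hk2, hdrop2, hfind2]
        rw [if_neg (by omega)]
        push_cast; ring
      rw [hpos2]
      rw [if_pos (by exact_mod_cast by omega)]
      have hsliceName : PySem.Chars.slice (pre ++ cs)
          (some (((pre.length + a.length + 1 : Nat) : Int)))
          (some ((pre.length + a.length + 1 + name.length : Nat) : Int)) = name := by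
        rw [PySem.Chars.slice_eq_listSlice, PySem.List.slice_natCast, hdrop2]
        rw [show pre.length + a.length + 1 + name.length - (pre.length + a.length + 1)
          = name.length by omega]
        conv_lhs => rw [hrest]
        exact List.take_left
      rw [hsliceName, if_pos hid]
      have hsliceBefore : PySem.Chars.slice (pre ++ cs)
          (some ((pre.length : Nat) : Int))
          (some ((pre.length + a.length : Nat) : Int)) = a := by
        rw [PySem.Chars.slice_eq_listSlice, PySem.List.slice_natCast, List.drop_left]
        rw [show pre.length + a.length - pre.length = a.length by omega]
        conv_lhs => rw [hcs]
        exact List.take_left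
      rw [hsliceBefore]
      have hcast2 : (((pre.length + a.length + 1 + name.length : Nat) : Int) + 1)
          = (((pre ++ a ++ '{' :: (name ++ ['}'])).length : Nat) : Int) := by
        push_cast
        simp [List.length_append]
        ring
      rw [hcast2]
      rw [show pre ++ cs = (pre ++ a ++ '{' :: (name ++ ['}'])) ++ tail by
        conv_lhs => rw [hcs, hrest]
        simp]
      rw [ih tail _ _ f (by omega) ?_ (by omega)]
      · conv_rhs => rw [show cs = a ++ '{' :: (name ++ '}' :: tail) by
          conv_lhs => rw [hcs, hrest]]
        rw [altCore_step a name tail hna hnb hid]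
        simp [List.append_assoc]
      · -- PreC tail
        have hxall : ∀ y ∈ name ++ ['}'], (y == '{') = false := by
          intro y hy
          rcases List.mem_append.mp hy with h'|h'
          · simp only [beq_eq_false_iff_ne]
            exact fun he => hnbrace (he ▸ h')
          · simp only [List.mem_singleton] at h'
            subst h'
            decide
        have hrs : rest.splitOn '{' = (tail.splitOn '{').modifyHead ((name ++ ['}']) ++ ·) := by
          conv_lhs => rw [show rest = (name ++ ['}']) ++ tail by rw [hrest]; simp]
          simp only [List.splitOn]
          exact splitOnP_append_not _ _ _ hxall
        have htails : (rest.splitOn '{').tail = (tail.splitOn '{').tail := by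
          rw [hrs]
          cases h' : tail.splitOn '{' with
          | nil => exact absurd h' (by simp only [List.splitOn]; exact List.splitOnP_ne_nil _ _)
          | cons b bs => simp
        intro part hpart
        apply hpre part
        rw [hsplit]
        simp only [List.tail_cons]
        exact List.mem_of_mem_tail (htails ▸ hpart)

-- ===== VERDICT (by name: the statement is the Claim_ definition above) =====
theorem url_pattern_spec : Claim_equal_url_pattern := by
  intro pattern _ hpre
  unfold Spec_url_pattern url_pattern url_pattern_alt
  have := main_loop pattern.toList.length pattern.toList [] [] (pattern.toList.length + 1)
    (le_refl _) (preC_of_pre pattern hpre) (by omega)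
  simpa using congrArg String.ofList this
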